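-- pv_equiv track=rewrite | github.com/sakshamzip2-sys/opencomputer | OpenComputer/opencomputer/cli_banner.py | _truncate_csv
-- ===== SOURCE A (Python) =====
-- def _truncate_csv(items: list[str], max_chars: int) -> str:
--     """Return comma-separated items, truncated with `…` if over limit."""
--     joined = ", ".join(items)
--     if len(joined) <= max_chars:
--         return joined
--     out: list[str] = []
--     used = 0
--     ellipsis = ", …"
--     budget = max_chars - len(ellipsis)
--     for it in items:
--         addition = (", " if out else "") + it
--         if used + len(addition) > budget:
--             break
--         out.append(it)
--         used += len(addition)
--     return ", ".join(out) + ellipsis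
-- ===== SOURCE B (Python) =====
-- def _truncate_csv(items: list[str], max_chars: int) -> str:
--     """Return comma-separated items, truncated with `…` if over limit."""
--     joined = ", ".join(items)
--     if len(joined) <= max_chars:
--         return joined
--     budget = max_chars - 3  # len(", …") == 3
--     # cost table: joined length of the first k items is prefix[k-1]
--     costs = [len(items[0])] + [len(it) + 2 for it in items[1:]] if items else []
--     prefix = []
--     total = 0
--     for c in costs:
--         total += c
--         prefix.append(total)
--     # prefix is nondecreasing, so the largest fitting k is the count of entries <= budget
--     k = sum(1 for p in prefix if p <= budget)
--     return ", ".join(items[:k]) + ", …"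
-- ===== Notes on version B (the rewrite author's own statement) =====
-- stated objective: alternative
-- what changed: Replaces A's stateful scan-and-break that builds the output list incrementally with a precomputed per-item cost table and cumulative-length prefix sums, from which the largest fitting item count k is read off as a threshold count and the result produced by one slice-and-join.
import Mathlib
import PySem

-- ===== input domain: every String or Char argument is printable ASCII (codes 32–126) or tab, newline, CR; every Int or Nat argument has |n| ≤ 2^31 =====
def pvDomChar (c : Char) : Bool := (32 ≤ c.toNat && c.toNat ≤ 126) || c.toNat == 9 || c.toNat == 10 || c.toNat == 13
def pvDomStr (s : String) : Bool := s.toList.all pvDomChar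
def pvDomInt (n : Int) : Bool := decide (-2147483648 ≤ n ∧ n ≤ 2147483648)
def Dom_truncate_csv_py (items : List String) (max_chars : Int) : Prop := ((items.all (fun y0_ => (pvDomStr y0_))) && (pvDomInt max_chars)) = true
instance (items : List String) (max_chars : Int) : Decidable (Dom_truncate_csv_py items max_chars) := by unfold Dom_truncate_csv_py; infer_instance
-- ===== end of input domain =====

-- B replaces A's scan-and-break accumulation with a cost table + prefix sums + threshold count (alternative decomposition, same cost).

-- ===== PORT A =====
-- the for-loop of A with early break: state (out, used)
def truncA_loop (budget : Int) : List String → List String → Int → List String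
  | [], out, _ => out
  | it :: rest, out, used =>
      let addition : String := (if out.isEmpty then "" else ", ") ++ it
      if budget < used + PySem.Str.len addition then out
      else truncA_loop budget rest (out ++ [it]) (used + PySem.Str.len addition)

def truncate_csv_py (items : List String) (max_chars : Int) : String :=
  let joined := PySem.Str.join ", " items
  if PySem.Str.len joined ≤ max_chars then joined
  else
    let ellipsis : String := ", …"
    let budget := max_chars - PySem.Str.len ellipsis
    let out := truncA_loop budget items [] 0
    PySem.Str.join ", " out ++ ellipsis

-- ===== PORT B =====
-- the accumulating prefix loop of B
def accumB (total : Int) : List Int → List Int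
  | [] => []
  | c :: cs => (total + c) :: accumB (total + c) cs

def truncate_csv_py_alt (items : List String) (max_chars : Int) : String :=
  let joined := PySem.Str.join ", " items
  if PySem.Str.len joined ≤ max_chars then joined
  else
    let budget := max_chars - 3
    let costs : List Int :=
      match items with
      | [] => []
      | first :: rest => PySem.Str.len first :: rest.map (fun it => PySem.Str.len it + 2)
    let pfx := accumB 0 costs
    let k := pfx.countP (fun p => decide (p ≤ budget))
    PySem.Str.join ", " (items.take k) ++ ", …"

-- ===== PRECONDITION & SPEC =====
def Spec_truncate_csv_py (items : List String) (max_chars : Int) (out : String) : Prop := out = truncate_csv_py_alt items max_chars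
instance (items : List String) (max_chars : Int) (out : String) : Decidable (Spec_truncate_csv_py items max_chars out) := by unfold Spec_truncate_csv_py; infer_instance

-- ===== CLAIM (what is proved, stated in full; the proofs are below) =====
def Claim_equal_truncate_csv_py : Prop := ∀ (items : List String) (max_chars : Int), Dom_truncate_csv_py items max_chars → Spec_truncate_csv_py items max_chars (truncate_csv_py items max_chars)

-- ===== LEMMAS AND PROOFS =====

-- greedy fit count: how many items A's loop takes, as a function of the cost list
def greedyFit : List Int → Int → Nat
  | [], _ => 0
  | c :: cs, b => if b < c then 0 else greedyFit cs (b - c) + 1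

theorem truncA_loop_nonempty (budget : Int) :
    ∀ (rest out : List String) (used : Int), out ≠ [] →
      truncA_loop budget rest out used =
        out ++ rest.take (greedyFit (rest.map (fun it => PySem.Str.len it + 2)) (budget - used)) := by
  intro rest
  induction rest with
  | nil => intro out used _; simp [truncA_loop]
  | cons it rest ih =>
      intro out used hne
      have hout : out.isEmpty = false := by simp [hne]
      have hlen : PySem.Str.len ((if out.isEmpty then "" else ", ") ++ it)
          = 2 + PySem.Str.len it := by
        simp [hout]; omega
      simp only [truncA_loop, hlen, List.map_cons, greedyFit]
      by_cases h : budget - used < PySem.Str.len it + 2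
      · rw [if_pos (by omega), if_pos h]; simp
      · rw [if_neg (by omega), if_neg h]
        rw [ih (out ++ [it]) (used + (2 + PySem.Str.len it)) (by simp)]
        have heq : budget - (used + (2 + PySem.Str.len it)) = budget - used - (PySem.Str.len it + 2) := by
          omega
        rw [heq, List.take_succ_cons]
        simp

theorem truncA_loop_start (budget : Int) (items : List String) :
    truncA_loop budget items [] 0 =
      items.take (greedyFit
        (match items with
         | [] => []
         | first :: rest => PySem.Str.len first :: rest.map (fun it => PySem.Str.len it + 2)) budget) := by
  cases items with
  | nil => simp [truncA_loop, greedyFit]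
  | cons first rest =>
      have hlen : PySem.Str.len ((if ([] : List String).isEmpty then "" else ", ") ++ first)
          = PySem.Str.len first := by simp
      simp only [truncA_loop, hlen, greedyFit]
      by_cases h : budget < PySem.Str.len first
      · rw [if_pos (by omega), if_pos h]; simp
      · rw [if_neg (by omega), if_neg h]
        rw [truncA_loop_nonempty budget rest ([] ++ [first]) (0 + PySem.Str.len first) (by simp)]
        have heq : budget - (0 + PySem.Str.len first) = budget - PySem.Str.len first := by omega
        rw [heq, List.take_succ_cons]
        simp

theorem countP_accumB_zero (b : Int) :
    ∀ (cs : List Int) (a : Int), (∀ c ∈ cs, 0 ≤ c) → b < a →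
      (accumB a cs).countP (fun p => decide (p ≤ b)) = 0 := by
  intro cs
  induction cs with
  | nil => intro a _ _; simp [accumB]
  | cons c cs ih =>
      intro a hnn hba
      have hc : 0 ≤ c := hnn c (by simp)
      simp only [accumB, List.countP_cons]
      rw [ih (a + c) (fun x hx => hnn x (by simp [hx])) (by omega)]
      simp; omega

theorem countP_accumB (b : Int) :
    ∀ (cs : List Int) (a : Int), (∀ c ∈ cs, 0 ≤ c) →
      (accumB a cs).countP (fun p => decide (p ≤ b)) = greedyFit cs (b - a) := by
  intro cs
  induction cs with
  | nil => intro a _; simp [accumB, greedyFit]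
  | cons c cs ih =>
      intro a hnn
      have hc : 0 ≤ c := hnn c (by simp)
      have hnn' : ∀ x ∈ cs, 0 ≤ x := fun x hx => hnn x (by simp [hx])
      simp only [accumB, List.countP_cons, greedyFit]
      by_cases h : b - a < c
      · rw [if_pos h, countP_accumB_zero b cs (a + c) hnn' (by omega)]
        simp; omega
      · rw [if_neg h, ih (a + c) hnn']
        have : b - (a + c) = b - a - c := by omega
        simp [this]; omega

theorem len_ellipsis : PySem.Str.len ", …" = 3 := by decide

-- ===== VERDICT (by name: the statement is the Claim_ definition above) =====
theorem truncate_csv_py_spec : Claim_equal_truncate_csv_py := by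
  intro items max_chars _
  unfold Spec_truncate_csv_py truncate_csv_py truncate_csv_py_alt
  simp only [len_ellipsis]
  have hnn : ∀ c ∈ (match items with
      | [] => ([] : List Int)
      | first :: rest => PySem.Str.len first :: rest.map (fun it => PySem.Str.len it + 2)), 0 ≤ c := by
    cases items with
    | nil => simp
    | cons first rest =>
        intro c hc
        simp only [List.mem_cons, List.mem_map] at hc
        rcases hc with h | ⟨x, _, h⟩ <;> simp only [PySem.Str.len_eq] at h <;> omega
  split
  · rfl
  · rw [truncA_loop_start, countP_accumB (max_chars - 3) _ 0 hnn]
    norm_num
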